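-- pv_equiv track=rewrite | github.com/Lexomir/lex2d | utils.py | addon_has_breaking_changes
-- ===== SOURCE A (Python) =====
-- def version_compare(version1, version2):
--     version_change = version2[0] - version1[0]
--     if version_change < 0:
--         return -1
--     elif version_change == 0:
--         return version_compare(version1[1:], version2[1:]) if len(version1) > 1 else 0
--     else:
--         return 1
--
-- def addon_has_breaking_changes(old_version, new_version):
--     break_versions = [
--         (1,0,0)]
--     old_version = tuple(old_version)
--     new_version = tuple(new_version)
--     if old_version == new_version:
--         return False
--     for bv in break_versions:
--         starts_before_break = version_compare(old_version, bv) > 0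
--         ends_after_break = version_compare(bv, new_version) >= 0
--         if starts_before_break and ends_after_break:
--             return True
--     return False
-- ===== SOURCE B (Python) =====
-- def _cmp(v1, v2):
--     # iterative, index-based version comparison (same truncation rule as the
--     # recursive original: only the first len(v1) positions are inspected)
--     i = 0
--     while True:
--         d = v2[i] - v1[i]
--         if d:
--             return 1 if d > 0 else -1
--         if len(v1) - i <= 1:
--             return 0
--         i += 1
--
-- def addon_has_breaking_changes(old_version, new_version):
--     old_version = tuple(old_version)
--     new_version = tuple(new_version)
--     if old_version == new_version:
--         return False
--     bv = (1, 0, 0)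
--     return _cmp(old_version, bv) > 0 and _cmp(bv, new_version) >= 0
-- ===== Notes on version B (the rewrite author's own statement) =====
-- stated objective: simpler
-- what changed: Recursion-over-tails version_compare becomes an explicit index loop, and the one-element break_versions loop is inlined into a single short-circuit boolean expression.
import Mathlib
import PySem

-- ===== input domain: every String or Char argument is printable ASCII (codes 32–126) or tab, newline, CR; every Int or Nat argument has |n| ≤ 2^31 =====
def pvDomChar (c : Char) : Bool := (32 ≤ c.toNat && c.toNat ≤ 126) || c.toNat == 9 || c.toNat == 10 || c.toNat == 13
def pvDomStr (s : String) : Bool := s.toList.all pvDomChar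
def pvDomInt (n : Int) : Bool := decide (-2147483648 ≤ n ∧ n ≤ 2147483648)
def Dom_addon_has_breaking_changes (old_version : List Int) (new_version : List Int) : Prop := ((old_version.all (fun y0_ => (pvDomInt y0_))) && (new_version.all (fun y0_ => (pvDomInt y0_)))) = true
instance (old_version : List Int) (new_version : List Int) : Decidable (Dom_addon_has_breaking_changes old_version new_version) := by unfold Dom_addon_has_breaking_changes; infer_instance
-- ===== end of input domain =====

-- B replaces the recursive version_compare by an explicit index loop and inlines the
-- one-element break_versions loop into a single boolean expression (objective: simpler).

-- ===== PORT A =====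
-- version_compare; none = IndexError (v[0] on an empty list)
def vcA (version1 version2 : List Int) : Option Int :=
  match version1, version2 with
  | a :: t1, b :: t2 =>
    let version_change := b - a
    if version_change < 0 then some (-1)
    else if version_change = 0 then
      if t1.length + 1 > 1 then vcA t1 t2 else some 0
    else some 1
  | _, _ => none

-- the `for bv in break_versions` loop; none = an IndexError escaping from version_compare
def breakLoopA (old_version new_version : List Int) : List (List Int) → Option Bool
  | [] => some false
  | bv :: rest =>
    match vcA old_version bv, vcA bv new_version with
    | some s, some e =>
      if s > 0 ∧ e ≥ 0 then some true else breakLoopA old_version new_version rest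
    | _, _ => none

def addon_has_breaking_changes (old_version : List Int) (new_version : List Int) : Bool :=
  if old_version = new_version then false
  else (breakLoopA old_version new_version [[1, 0, 0]]).getD false
  -- .getD false is never reached under Pre_ (Python raises IndexError there)

-- ===== PORT B =====
-- _cmp from Source B: index loop; none = IndexError at v2[i] or v1[i]
def cmpB (v1 v2 : List Int) (i : Nat) : Option Int :=
  match h2 : v2[i]?, h1 : v1[i]? with
  | some b, some a =>
    let d := b - a
    if d ≠ 0 then some (if d > 0 then 1 else -1)
    else if v1.length - i ≤ 1 then some 0
    else cmpB v1 v2 (i + 1)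
  | _, _ => none
termination_by v1.length - i
decreasing_by
  have : i < v1.length := by
    by_contra hi
    simp [List.getElem?_eq_none (by omega : v1.length ≤ i)] at h1
  omega

def addon_has_breaking_changes_alt (old_version : List Int) (new_version : List Int) : Bool :=
  if old_version = new_version then false
  else
    match cmpB old_version [1, 0, 0] 0 with
    | some s =>
      if s > 0 then
        match cmpB [1, 0, 0] new_version 0 with
        | some e => decide (e ≥ 0)
        | none => false   -- never reached under Pre_
      else false          -- short-circuit of `and`
    | none => false       -- never reached under Pre_

-- ===== PRECONDITION & SPEC =====
-- Pre_ excludes exactly the inputs on which the Python A raises IndexError: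
-- unless old == new (early exit), old must be non-empty and must not extend the
-- prefix [1,0,0] beyond length 3, and new must not be [], [1] or [1,0].
def Pre_addon_has_breaking_changes (old_version : List Int) (new_version : List Int) : Prop :=
  old_version = new_version ∨
    (old_version ≠ [] ∧ ¬(old_version.take 3 = [1, 0, 0] ∧ 3 < old_version.length) ∧
     new_version ≠ [] ∧ new_version ≠ [1] ∧ new_version ≠ [1, 0])
instance (old_version : List Int) (new_version : List Int) : Decidable (Pre_addon_has_breaking_changes old_version new_version) := by
  unfold Pre_addon_has_breaking_changes; infer_instance

def pvWitness_addon_has_breaking_changes : List Int × List Int := ([0, 9], [1, 0, 0])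

def Spec_addon_has_breaking_changes (old_version : List Int) (new_version : List Int) (out : Bool) : Prop := out = addon_has_breaking_changes_alt old_version new_version
instance (old_version : List Int) (new_version : List Int) (out : Bool) : Decidable (Spec_addon_has_breaking_changes old_version new_version out) := by unfold Spec_addon_has_breaking_changes; infer_instance

-- ===== CLAIM (what is proved, stated in full; the proofs are below) =====
def Claim_equal_addon_has_breaking_changes : Prop := ∀ (old_version : List Int) (new_version : List Int), Dom_addon_has_breaking_changes old_version new_version → Pre_addon_has_breaking_changes old_version new_version → Spec_addon_has_breaking_changes old_version new_version (addon_has_breaking_changes old_version new_version)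

-- ===== LEMMAS AND PROOFS =====

-- B's index loop computes A's recursion on the dropped suffixes.
theorem cmpB_eq_vcA (v1 v2 : List Int) (i : Nat) :
    cmpB v1 v2 i = vcA (v1.drop i) (v2.drop i) := by
  induction i using cmpB.induct (v1 := v1) (v2 := v2) with
  | case1 i b a h2 h1 d hd =>
    have hi1 : i < v1.length := by
      by_contra hi; simp [List.getElem?_eq_none (by omega : v1.length ≤ i)] at h1
    have hi2 : i < v2.length := by
      by_contra hi; simp [List.getElem?_eq_none (by omega : v2.length ≤ i)] at h2
    have ha : v1[i] = a := by simpa [List.getElem?_eq_getElem hi1] using h1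
    have hb : v2[i] = b := by simpa [List.getElem?_eq_getElem hi2] using h2
    rw [List.drop_eq_getElem_cons hi1, List.drop_eq_getElem_cons hi2, cmpB, h2, h1]
    simp only [vcA, ha, hb]
    split_ifs <;> first | rfl | omega
  | case2 i b a h2 h1 d hd hle =>
    have hi1 : i < v1.length := by
      by_contra hi; simp [List.getElem?_eq_none (by omega : v1.length ≤ i)] at h1
    have hi2 : i < v2.length := by
      by_contra hi; simp [List.getElem?_eq_none (by omega : v2.length ≤ i)] at h2
    have ha : v1[i] = a := by simpa [List.getElem?_eq_getElem hi1] using h1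
    have hb : v2[i] = b := by simpa [List.getElem?_eq_getElem hi2] using h2
    have hlen : (v1.drop (i+1)).length = v1.length - (i+1) := by simp
    rw [List.drop_eq_getElem_cons hi1, List.drop_eq_getElem_cons hi2, cmpB, h2, h1]
    simp only [vcA, ha, hb]
    split_ifs <;> first | rfl | omega
  | case3 i b a h2 h1 d hd hle ih =>
    have hi1 : i < v1.length := by
      by_contra hi; simp [List.getElem?_eq_none (by omega : v1.length ≤ i)] at h1
    have hi2 : i < v2.length := by
      by_contra hi; simp [List.getElem?_eq_none (by omega : v2.length ≤ i)] at h2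
    have ha : v1[i] = a := by simpa [List.getElem?_eq_getElem hi1] using h1
    have hb : v2[i] = b := by simpa [List.getElem?_eq_getElem hi2] using h2
    have hlen : (v1.drop (i+1)).length = v1.length - (i+1) := by simp
    rw [List.drop_eq_getElem_cons hi1, List.drop_eq_getElem_cons hi2, cmpB, h2, h1]
    simp only [vcA, ha, hb]
    split_ifs <;> first | rfl | exact ih | omega
  | case4 i h =>
    rw [cmpB]
    rcases h2 : v2[i]? with _ | b
    · have hv2 : v2.length ≤ i := by
        rcases Nat.lt_or_ge i v2.length with hlt | hge
        · simp [List.getElem?_eq_getElem hlt] at h2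
        · exact hge
      simp only [List.drop_eq_nil_of_le hv2]
      cases hv : v1.drop i <;> rfl
    · rcases h1 : v1[i]? with _ | a
      · have hv1 : v1.length ≤ i := by
          rcases Nat.lt_or_ge i v1.length with hlt | hge
          · simp [List.getElem?_eq_getElem hlt] at h1
          · exact hge
        simp only [List.drop_eq_nil_of_le hv1]
        rfl
      · exact (h b a h2 h1).elim

-- A's first comparison never raises under Pre_.
theorem vcA_old_isSome (o : List Int) (h0 : o ≠ [])
    (h1 : ¬(o.take 3 = [1, 0, 0] ∧ 3 < o.length)) :
    (vcA o [1, 0, 0]).isSome = true := by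
  match o with
  | [a] => simp [vcA]; split_ifs <;> simp
  | [a, b] => simp [vcA]; split_ifs <;> simp
  | [a, b, c] => simp [vcA]; split_ifs <;> simp
  | a :: b :: c :: d :: t =>
    simp only [List.take, List.length_cons] at h1
    simp [vcA]; split_ifs <;> simp_all <;> omega

-- A's second comparison never raises under Pre_.
theorem vcA_new_isSome (n : List Int) (h0 : n ≠ []) (h1 : n ≠ [1]) (h2 : n ≠ [1, 0]) :
    (vcA [1, 0, 0] n).isSome = true := by
  match n with
  | [a] =>
    have : a ≠ 1 := by rintro rfl; exact h1 rfl
    simp [vcA]; split_ifs <;> simp_all <;> omega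
  | [a, b] =>
    have : a ≠ 1 ∨ b ≠ 0 := by
      by_contra hc; push_neg at hc; exact h2 (by simp [hc.1, hc.2])
    simp [vcA]; split_ifs <;> simp_all <;> omega
  | a :: b :: c :: t => simp [vcA]; split_ifs <;> simp

-- ===== VERDICT (by name: the statement is the Claim_ definition above) =====
theorem addon_has_breaking_changes_spec : Claim_equal_addon_has_breaking_changes := by
  intro o n _ hpre
  unfold Spec_addon_has_breaking_changes addon_has_breaking_changes addon_has_breaking_changes_alt
  by_cases hon : o = n
  · simp [hon]
  · rcases hpre with h | ⟨h0, h1, hn0, hn1, hn2⟩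
    · exact absurd h hon
    obtain ⟨s, hs⟩ := Option.isSome_iff_exists.mp (vcA_old_isSome o h0 h1)
    obtain ⟨e, he⟩ := Option.isSome_iff_exists.mp (vcA_new_isSome n hn0 hn1 hn2)
    rw [if_neg hon, if_neg hon,
        show cmpB o [1,0,0] 0 = vcA o [1,0,0] from by simpa using cmpB_eq_vcA o [1,0,0] 0,
        show cmpB [1,0,0] n 0 = vcA [1,0,0] n from by simpa using cmpB_eq_vcA [1,0,0] n 0,
        hs, he]
    simp only [breakLoopA, hs, he]
    by_cases hsp : s > 0 <;> by_cases hep : e ≥ 0 <;>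
      simp [hsp, hep, breakLoopA]
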